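-- pv_equiv track=rewrite | github.com/stefanyang123/11 | 0序章/进制.py | oxx
-- ===== SOURCE A (Python) =====
-- def oxx(n):
--     """
--     十进制转换十六进制Demo限制
--     :param n:
--     :return:以字符串形式返回十六进制数
--     """
--     x = '0123456789ABCDEF'
--     listNew=[]
--     for a in x:
--         for b in x:
--             for c in x:
--                 for d in x:
--                     ox =a+b+c+d
--                     listNew.append(ox)
--                 pass
--             pass
--         pass
--     pass
--     return listNew[n]
-- ===== SOURCE B (Python) =====
-- def oxx(n):
--     idx = n if n >= 0 else n + 65536
--     if not (0 <= idx < 65536):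
--         raise IndexError('list index out of range')
--     digits = '0123456789ABCDEF'
--     out = []
--     for _ in range(4):
--         idx, r = divmod(idx, 16)
--         out.append(digits[r])
--     return ''.join(reversed(out))
-- ===== Notes on version B (the rewrite author's own statement) =====
-- stated objective: faster
-- what changed: B computes the 4 hex digits of the (negative-wraparound-normalised) index directly by four divmod(idx,16) steps instead of enumerating all 65536 four-character strings and indexing into the list.
import Mathlib
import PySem

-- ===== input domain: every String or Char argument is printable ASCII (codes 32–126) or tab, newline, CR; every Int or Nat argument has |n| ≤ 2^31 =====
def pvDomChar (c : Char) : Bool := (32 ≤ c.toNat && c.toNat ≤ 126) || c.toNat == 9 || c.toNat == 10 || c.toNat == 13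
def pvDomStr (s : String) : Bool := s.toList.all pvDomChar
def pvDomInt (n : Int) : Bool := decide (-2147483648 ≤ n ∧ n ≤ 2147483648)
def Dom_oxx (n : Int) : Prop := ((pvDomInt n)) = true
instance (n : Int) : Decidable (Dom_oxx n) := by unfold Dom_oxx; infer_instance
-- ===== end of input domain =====

-- B replaces A's enumeration of all 65536 four-character hex strings by a direct
-- four-step divmod extraction of the digits of the (wraparound-normalised) index.

-- ===== PORT A =====
def oxx (n : Int) : String :=
  let x := "0123456789ABCDEF".toList
  let listNew : List String :=
    x.foldl (fun acc1 a =>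
      x.foldl (fun acc2 b =>
        x.foldl (fun acc3 c =>
          x.foldl (fun acc4 d => acc4 ++ [String.ofList [a, b, c, d]]) acc3) acc2) acc1) []
  -- listNew[n]: none = IndexError, excluded by Pre_oxx
  (PySem.List.pyGet? listNew n).getD ""

-- ===== PORT B =====
def oxx_alt (n : Int) : String :=
  let idx := if n ≥ 0 then n else n + 65536
  if 0 ≤ idx ∧ idx < 65536 then
    let digits := "0123456789ABCDEF".toList
    -- the 4-iteration loop: idx, r = divmod(idx, 16); out.append(digits[r])
    let res := (PySem.List.pyRange 0 4 1).foldl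
      (fun (p : Int × List Char) _ =>
        (PySem.Int.floordiv p.1 16,
         p.2 ++ [(PySem.List.pyGet? digits (PySem.Int.mod p.1 16)).getD ' ']))
      (idx, [])
    String.ofList res.2.reverse
  else ""  -- Python B raises IndexError here; outside Pre_oxx

-- ===== PRECONDITION & SPEC =====
-- A raises IndexError (and B raises IndexError too) when n is outside the list-index
-- range -65536 ≤ n < 65536; exactly those inputs are excluded.
def Pre_oxx (n : Int) : Prop := -65536 ≤ n ∧ n < 65536
instance (n : Int) : Decidable (Pre_oxx n) := by unfold Pre_oxx; infer_instance
def pvWitness_oxx : Int := 255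

def Spec_oxx (n : Int) (out : String) : Prop := out = oxx_alt n
instance (n : Int) (out : String) : Decidable (Spec_oxx n out) := by unfold Spec_oxx; infer_instance

-- ===== CLAIM (what is proved, stated in full; the proofs are below) =====
def Claim_equal_oxx : Prop := ∀ (n : Int), Dom_oxx n → Pre_oxx n → Spec_oxx n (oxx n)

-- ===== LEMMAS AND PROOFS =====

def pvHx : List Char := ['0','1','2','3','4','5','6','7','8','9','A','B','C','D','E','F']

theorem pvHx_eq : "0123456789ABCDEF".toList = pvHx := by decide

/-- the common value: the 4 hex nibbles of i (i < 65536) -/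
def pvG (i : Nat) : String :=
  String.ofList [pvHx.getD (i / 4096) ' ', pvHx.getD (i / 256 % 16) ' ',
                 pvHx.getD (i / 16 % 16) ' ', pvHx.getD (i % 16) ' ']

theorem pv_length_flatMap_uniform {α β : Type} (f : α → List β) (k : Nat) :
    ∀ (xs : List α), (∀ a ∈ xs, (f a).length = k) → (xs.flatMap f).length = xs.length * k := by
  intro xs
  induction xs with
  | nil => simp
  | cons a xs ih =>
    intro h
    simp only [List.flatMap_cons, List.length_append, List.length_cons]
    rw [ih (fun b hb => h b (List.mem_cons_of_mem a hb)), h a (List.mem_cons_self)]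
    ring

theorem pv_get?_flatMap_uniform {α β : Type} (f : α → List β) (k : Nat) (hk : 0 < k) :
    ∀ (xs : List α) (i : Nat), (∀ a ∈ xs, (f a).length = k) → i < xs.length * k →
      (xs.flatMap f)[i]? = xs[i / k]?.bind (fun a => (f a)[i % k]?) := by
  intro xs
  induction xs with
  | nil => intro i _ hi; simp at hi
  | cons a xs ih =>
    intro i h hi
    have hfa : (f a).length = k := h a (List.mem_cons_self)
    have hmul : (a :: xs).length * k = xs.length * k + k := by
      simp only [List.length_cons]; ring
    rw [hmul] at hi
    by_cases hik : i < k
    · rw [List.flatMap_cons, List.getElem?_append_left (by omega),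
        Nat.div_eq_of_lt hik, Nat.mod_eq_of_lt hik]
      simp
    · obtain ⟨j, rfl⟩ : ∃ j, i = k + j := ⟨i - k, by omega⟩
      rw [List.flatMap_cons, List.getElem?_append_right (by omega)]
      have hj : k + j - (f a).length = j := by omega
      rw [hj, ih j (fun b hb => h b (List.mem_cons_of_mem a hb)) (by omega),
        Nat.add_div_left j hk, Nat.add_mod_left]
      simp

/-- A's listNew as a flatMap -/
theorem pv_listNew_eq :
    (pvHx.foldl (fun acc1 a =>
      pvHx.foldl (fun acc2 b =>
        pvHx.foldl (fun acc3 c =>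
          pvHx.foldl (fun acc4 d => acc4 ++ [String.ofList [a, b, c, d]]) acc3) acc2) acc1) [])
    = pvHx.flatMap (fun a => pvHx.flatMap (fun b => pvHx.flatMap (fun c =>
        pvHx.map (fun d => String.ofList [a, b, c, d])))) := by
  simp only [PySem.List.foldl_append_singleton_eq_map, PySem.List.foldl_append_eq_flatMap,
    List.nil_append]

theorem pv_inner_len (a b c : Char) :
    (pvHx.map (fun d => String.ofList [a, b, c, d])).length = 16 := by
  simp [pvHx]

theorem pv_len2 (a b : Char) :
    (pvHx.flatMap (fun c => pvHx.map (fun d => String.ofList [a, b, c, d]))).length = 256 := by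
  rw [pv_length_flatMap_uniform _ 16 _ (fun c _ => pv_inner_len a b c)]; rfl

theorem pv_len3 (a : Char) :
    (pvHx.flatMap (fun b => pvHx.flatMap (fun c =>
      pvHx.map (fun d => String.ofList [a, b, c, d])))).length = 4096 := by
  rw [pv_length_flatMap_uniform _ 256 _ (fun b _ => pv_len2 a b)]; rfl

theorem pv_listNew_len :
    (pvHx.flatMap (fun a => pvHx.flatMap (fun b => pvHx.flatMap (fun c =>
      pvHx.map (fun d => String.ofList [a, b, c, d]))))).length = 65536 := by
  rw [pv_length_flatMap_uniform _ 4096 _ (fun a _ => pv_len3 a)]; rfl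

theorem pvHx_length : pvHx.length = 16 := rfl

theorem pvHx_get (m : Nat) (h : m < 16) : pvHx[m]? = some (pvHx.getD m ' ') := by
  rw [List.getElem?_eq_getElem (by rw [pvHx_length]; omega),
    List.getD_eq_getElem _ _ (by rw [pvHx_length]; omega)]

/-- element i of A's list is the nibble string -/
theorem pv_listNew_get (i : Nat) (hi : i < 65536) :
    (pvHx.flatMap (fun a => pvHx.flatMap (fun b => pvHx.flatMap (fun c =>
      pvHx.map (fun d => String.ofList [a, b, c, d])))))[i]? = some (pvG i) := by
  rw [pv_get?_flatMap_uniform _ 4096 (by omega) _ i (fun a _ => pv_len3 a)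
      (by rw [pvHx_length]; omega)]
  rw [pvHx_get (i / 4096) (by omega)]
  simp only [Option.bind_some]
  rw [pv_get?_flatMap_uniform _ 256 (by omega) _ (i % 4096) (fun b _ => pv_len2 _ b)
      (by rw [pvHx_length]; omega)]
  rw [show i % 4096 / 256 = i / 256 % 16 by omega, pvHx_get (i / 256 % 16) (by omega)]
  simp only [Option.bind_some]
  rw [pv_get?_flatMap_uniform _ 16 (by omega) _ (i % 4096 % 256) (fun c _ => pv_inner_len _ _ c)
      (by rw [pvHx_length]; omega)]
  rw [show i % 4096 % 256 / 16 = i / 16 % 16 by omega, pvHx_get (i / 16 % 16) (by omega)]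
  simp only [Option.bind_some]
  rw [List.getElem?_map, show i % 4096 % 256 % 16 = i % 16 by omega,
    pvHx_get (i % 16) (by omega)]
  simp [pvG]

/-- A returns the nibble string of the normalised index -/
theorem pv_A_eq (n : Int) (hn : Pre_oxx n) :
    oxx n = pvG (if n ≥ 0 then n else n + 65536).toNat := by
  obtain ⟨h1, h2⟩ := hn
  unfold oxx
  dsimp only
  rw [pvHx_eq, pv_listNew_eq]
  by_cases h : n ≥ 0
  · rw [show n = ((n.toNat : Nat) : Int) by omega, PySem.List.pyGet?_natCast,
      pv_listNew_get n.toNat (by omega)]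
    simp only [Option.getD_some]
    rw [if_pos (by omega : ((n.toNat : Nat) : Int) ≥ 0)]
    rw [show ((n.toNat : Nat) : Int).toNat = n.toNat by omega]
  · rw [show n = -(((-n).toNat : Nat) : Int) by omega,
      PySem.List.pyGet?_neg_natCast _ _ (by omega) (by rw [pv_listNew_len]; omega),
      pv_listNew_len, show 65536 - (-n).toNat = (n + 65536).toNat by omega,
      pv_listNew_get _ (by omega)]
    simp only [Option.getD_some]
    rw [if_neg (by omega : ¬ (-(((-n).toNat : Nat) : Int) ≥ 0))]
    rw [show (-(((-n).toNat : Nat) : Int) + 65536).toNat = (n + 65536).toNat by omega]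

theorem pv_cast16 : (16 : Int) = ((16 : Nat) : Int) := rfl

theorem pv_range4 : PySem.List.pyRange 0 4 1 = [0, 1, 2, 3] := by decide

/-- B returns the nibble string of the normalised index -/
theorem pv_B_eq (n : Int) (hn : Pre_oxx n) :
    oxx_alt n = pvG (if n ≥ 0 then n else n + 65536).toNat := by
  obtain ⟨h1, h2⟩ := hn
  unfold oxx_alt
  dsimp only
  set idx := if n ≥ 0 then n else n + 65536 with hidx
  have hpos : 0 ≤ idx ∧ idx < 65536 := by
    constructor <;> (rw [hidx]; split <;> omega)
  rw [if_pos hpos]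
  obtain ⟨hp, hlt⟩ := hpos
  obtain ⟨i, hieq⟩ : ∃ i : Nat, idx = (i : Int) := ⟨idx.toNat, by omega⟩
  have hi : i < 65536 := by omega
  rw [hieq, pv_range4, pvHx_eq]
  simp only [List.foldl_cons, List.foldl_nil, pv_cast16, PySem.Int.floordiv_natCast,
    PySem.Int.mod_natCast, PySem.List.pyGet?_natCast]
  rw [pvHx_get (i % 16) (by omega),
    pvHx_get (i / 16 % 16) (by omega),
    pvHx_get (i / 16 / 16 % 16) (by omega),
    pvHx_get (i / 16 / 16 / 16 % 16) (by omega)]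
  simp only [Option.getD_some, List.nil_append, List.cons_append, List.reverse_cons,
    List.reverse_nil]
  rw [show i / 16 / 16 / 16 % 16 = i / 4096 by omega,
    show i / 16 / 16 % 16 = i / 256 % 16 by omega]
  rw [show ((i : Int)).toNat = i by omega]
  rfl

-- ===== VERDICT (by name: the statement is the Claim_ definition above) =====
theorem oxx_spec : Claim_equal_oxx := by
  intro n _ hpre
  unfold Spec_oxx
  rw [pv_A_eq n hpre, pv_B_eq n hpre]
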